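-- pv_equiv track=rewrite | github.com/honeyhyuni/algorithm | programmers_level2/131127_programmers.py | check
-- ===== SOURCE A (Python) =====
-- def check(want_dict, check_dict):
--     for i, j in check_dict.items():
--         if j == 0:
--             continue
--         if i in want_dict:
--             if not j == want_dict[i]:
--                 return False
--         else:
--             return False
--
--     return True
-- ===== SOURCE B (Python) =====
-- def check(want_dict, check_dict):
--     nz = {i: j for i, j in check_dict.items() if j != 0}
--     return {**want_dict, **nz} == want_dict
-- ===== Notes on version B (the rewrite author's own statement) =====
-- stated objective: alternative
-- what changed: Instead of looping with per-key lookups and early returns, B overlays the nonzero entries of check_dict onto want_dict ({**want_dict, **nz}) and tests whole-dict equality: the merge leaves want_dict unchanged exactly when every nonzero entry already matches.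
import Mathlib
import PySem

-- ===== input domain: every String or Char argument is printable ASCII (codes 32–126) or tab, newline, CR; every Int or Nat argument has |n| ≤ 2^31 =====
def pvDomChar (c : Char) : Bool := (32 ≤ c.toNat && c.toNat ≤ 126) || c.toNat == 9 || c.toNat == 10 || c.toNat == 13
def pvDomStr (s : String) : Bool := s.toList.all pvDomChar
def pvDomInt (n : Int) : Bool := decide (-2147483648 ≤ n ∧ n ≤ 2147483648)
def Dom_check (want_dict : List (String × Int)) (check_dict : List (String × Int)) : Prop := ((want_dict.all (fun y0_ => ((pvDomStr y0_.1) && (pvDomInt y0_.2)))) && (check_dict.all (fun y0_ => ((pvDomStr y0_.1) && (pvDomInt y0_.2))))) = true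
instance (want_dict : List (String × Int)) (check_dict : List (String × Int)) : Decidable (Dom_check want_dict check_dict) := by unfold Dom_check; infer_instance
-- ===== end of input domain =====

-- B replaces the early-return loop with merge-and-compare: overlay the nonzero entries of
-- check_dict onto want_dict and test whole-dict equality; return values proved equal.

-- ===== PORT A =====
-- first-match association-list lookup: 'i in want_dict' / 'want_dict[i]' on the dict
def pyGetA : List (String × Int) → String → Option Int
  | [], _ => none
  | (k, v) :: rest, i => if k == i then some v else pyGetA rest i

-- the for-loop with early returns, as structural recursion over check_dict.items()
def checkLoop (want_dict : List (String × Int)) : List (String × Int) → Bool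
  | [] => true
  | (i, j) :: rest =>
    if j = 0 then checkLoop want_dict rest        -- continue
    else
      match pyGetA want_dict i with               -- 'if i in want_dict'
      | some v => if ¬ (j = v) then false else checkLoop want_dict rest
      | none => false

def check (want_dict : List (String × Int)) (check_dict : List (String × Int)) : Bool :=
  checkLoop want_dict check_dict

-- ===== PORT B =====
def check_alt (want_dict : List (String × Int)) (check_dict : List (String × Int)) : Bool :=
  -- nz = {i: j for i, j in check_dict.items() if j != 0}
  let nz : PySem.Dict String Int :=
    check_dict.foldl (fun d p => if p.2 ≠ 0 then d.insert p.1 p.2 else d) PySem.Dict.empty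
  -- want_dict as the dict it is
  let wd : PySem.Dict String Int :=
    want_dict.foldl (fun d p => d.insert p.1 p.2) PySem.Dict.empty
  -- merged = {**want_dict, **nz}
  let merged : PySem.Dict String Int :=
    nz.items.foldl (fun d p => d.insert p.1 p.2) wd
  -- merged == want_dict  (Python dict ==: same size, every item matched by lookup; order ignored)
  merged.size == wd.size && merged.items.all (fun p => wd.get? p.1 == some p.2)

-- ===== PRECONDITION & SPEC =====
-- Pre_ excludes association lists with duplicate keys: those do not represent a Python dict
-- (both parameters are dicts), so they are outside the convention's input domain.
def Pre_check (want_dict : List (String × Int)) (check_dict : List (String × Int)) : Prop :=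
  (want_dict.map Prod.fst).Nodup ∧ (check_dict.map Prod.fst).Nodup
instance (want_dict : List (String × Int)) (check_dict : List (String × Int)) : Decidable (Pre_check want_dict check_dict) := by unfold Pre_check; infer_instance

def pvWitness_check : (List (String × Int)) × (List (String × Int)) :=
  ([("a", 1), ("b", 2)], [("a", 1), ("c", 0)])

def Spec_check (want_dict : List (String × Int)) (check_dict : List (String × Int)) (out : Bool) : Prop := out = check_alt want_dict check_dict
instance (want_dict : List (String × Int)) (check_dict : List (String × Int)) (out : Bool) : Decidable (Spec_check want_dict check_dict out) := by unfold Spec_check; infer_instance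

-- ===== CLAIM (what is proved, stated in full; the proofs are below) =====
def Claim_equal_check : Prop := ∀ (want_dict : List (String × Int)) (check_dict : List (String × Int)), Dom_check want_dict check_dict → Pre_check want_dict check_dict → Spec_check want_dict check_dict (check want_dict check_dict)

-- ===== LEMMAS AND PROOFS =====

-- pointwise-equal predicates give equal 'all' over the same list
theorem all_congr_mem {α : Type} (l : List α) (p q : α → Bool)
    (h : ∀ x ∈ l, p x = q x) : l.all p = l.all q := by
  induction l with
  | nil => rfl
  | cons a rest ih =>
    simp only [List.all_cons, h a (by simp),
      ih (fun x hx => h x (by simp [hx]))]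

-- membership of a pair = first-match lookup, when keys are unique
theorem mem_iff_pyGetA (w : List (String × Int)) (i : String) (j : Int)
    (hw : (w.map Prod.fst).Nodup) : (i, j) ∈ w ↔ pyGetA w i = some j := by
  induction w with
  | nil => simp [pyGetA]
  | cons p rest ih =>
    obtain ⟨k, v⟩ := p
    simp only [List.map_cons, List.nodup_cons] at hw
    by_cases hk : k = i
    · subst hk
      simp only [pyGetA, beq_self_eq_true, if_pos, List.mem_cons]
      constructor
      · rintro (h | h)
        · simp [Prod.ext_iff] at h; simp [h]
        · exact absurd (List.mem_map_of_mem (f := Prod.fst) h) hw.1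
      · rintro h; left; simpa using h.symm
    · have : (k == i) = false := by simp [hk]
      simp only [pyGetA, this, Bool.false_eq_true, List.mem_cons]
      rw [ih hw.2]
      constructor
      · rintro (h | h)
        · exact absurd h.symm (by simp [Prod.ext_iff, hk])
        · exact h
      · exact fun h => Or.inr h

-- a conditional-insert fold is the fold over the filtered list
theorem foldl_if_filter (c : List (String × Int)) (d : PySem.Dict String Int) :
    c.foldl (fun d p => if p.2 ≠ 0 then d.insert p.1 p.2 else d) d
      = (c.filter (fun p => p.2 ≠ 0)).foldl (fun d p => d.insert p.1 p.2) d := by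
  induction c generalizing d with
  | nil => rfl
  | cons p rest ih => by_cases h : p.2 = 0 <;> simp [h] <;> simpa using ih _

-- the filtered comprehension over fresh distinct keys lists exactly the nonzero items
theorem nz_items (c : List (String × Int)) (hc : (c.map Prod.fst).Nodup) :
    (c.foldl (fun d p => if p.2 ≠ 0 then d.insert p.1 p.2 else d)
      (PySem.Dict.empty : PySem.Dict String Int)).items
      = c.filter (fun p => p.2 ≠ 0) := by
  rw [foldl_if_filter c PySem.Dict.empty]
  have hsub : ((c.filter (fun p => p.2 ≠ 0)).map Prod.fst).Sublist (c.map Prod.fst) :=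
    List.Sublist.map _ List.filter_sublist
  have hnd : ((c.filter (fun p => p.2 ≠ 0)).map Prod.fst).Nodup := hsub.nodup hc
  have := PySem.Dict.items_foldl_insert_fresh (l := c.filter (fun p => p.2 ≠ 0))
      (k := Prod.fst) (v := Prod.snd) (d := (PySem.Dict.empty : PySem.Dict String Int))
      (by intro a _; simp [PySem.Dict.contains_empty]) hnd
  simpa using this

-- want_dict read back as a dict lists its own items
theorem wd_items (w : List (String × Int)) (hw : (w.map Prod.fst).Nodup) :
    (w.foldl (fun d p => d.insert p.1 p.2)
      (PySem.Dict.empty : PySem.Dict String Int)).items = w := by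
  have := PySem.Dict.items_foldl_insert_fresh (l := w) (k := Prod.fst) (v := Prod.snd)
      (d := (PySem.Dict.empty : PySem.Dict String Int))
      (by intro a _; simp [PySem.Dict.contains_empty]) hw
  simpa using this

-- inserting a pair the dict already holds changes nothing (unique keys)
theorem insert_noop (d : PySem.Dict String Int) (k : String) (v : Int)
    (hnd : d.keys.Nodup) (h : d.get? k = some v) : d.insert k v = d := by
  apply PySem.Dict.ext
  have hc : d.contains k = true := by
    rw [PySem.Dict.contains_eq_isSome_get?, h]; rfl
  rw [PySem.Dict.items_insert_of_contains d v hc]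
  have hpt : ∀ p ∈ d.items, (fun p : String × Int => if (p.1 == k) = true then (k, v) else p) p = p := by
    intro p hp
    obtain ⟨a, b⟩ := p
    by_cases hk : a = k
    · subst hk
      have := PySem.Dict.get?_of_mem_items d hp hnd
      rw [h] at this
      simp at this
      simp [this]
    · simp [hk]
  rw [List.map_congr_left hpt]
  exact List.map_id' d.items

-- a fold of inserts all of which are noops is the identity
theorem foldl_insert_noop (l : List (String × Int)) (d : PySem.Dict String Int)
    (hnd : d.keys.Nodup) (h : ∀ p ∈ l, d.get? p.1 = some p.2) :
    l.foldl (fun d p => d.insert p.1 p.2) d = d := by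
  induction l with
  | nil => rfl
  | cons p rest ih =>
    simp only [List.foldl_cons]
    rw [insert_noop d p.1 p.2 hnd (h p (by simp))]
    exact ih (fun q hq => h q (by simp [hq]))

-- the fold leaves keys not in l alone, and stores the unique entry of each key of l
theorem get?_foldl_insert_of_not_mem (l : List (String × Int)) (d : PySem.Dict String Int)
    (k : String) (h : k ∉ l.map Prod.fst) :
    (l.foldl (fun d p => d.insert p.1 p.2) d).get? k = d.get? k := by
  induction l generalizing d with
  | nil => rfl
  | cons p rest ih =>
    simp only [List.map_cons, List.mem_cons, not_or] at h
    simp only [List.foldl_cons]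
    rw [ih _ h.2, PySem.Dict.get?_insert_of_ne _ _ h.1]

theorem get?_foldl_insert_of_mem (l : List (String × Int)) (d : PySem.Dict String Int)
    (k : String) (j : Int) (hnd : (l.map Prod.fst).Nodup) (h : (k, j) ∈ l) :
    (l.foldl (fun d p => d.insert p.1 p.2) d).get? k = some j := by
  induction l generalizing d with
  | nil => cases h
  | cons p rest ih =>
    simp only [List.map_cons, List.nodup_cons] at hnd
    rcases List.mem_cons.mp h with h | h
    · subst h
      simp only [List.foldl_cons]
      rw [get?_foldl_insert_of_not_mem _ _ _ hnd.1, PySem.Dict.get?_insert_self]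
    · exact ih _ hnd.2 h

-- Python's '==' on the merged dict equals the pointwise check over l
theorem merge_eq_iff (l : List (String × Int)) (d : PySem.Dict String Int)
    (hl : (l.map Prod.fst).Nodup) (hd : d.keys.Nodup) :
    ((l.foldl (fun d p => d.insert p.1 p.2) d).size == d.size
      && (l.foldl (fun d p => d.insert p.1 p.2) d).items.all
           (fun p => d.get? p.1 == some p.2))
      = l.all (fun p => d.get? p.1 == some p.2) := by
  by_cases h : ∀ p ∈ l, d.get? p.1 = some p.2
  · rw [foldl_insert_noop l d hd h]
    have h1 : (l.all (fun p => d.get? p.1 == some p.2)) = true := by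
      simp only [List.all_eq_true]; intro p hp; simpa using h p hp
    have h2 : (d.items.all (fun p => d.get? p.1 == some p.2)) = true := by
      simp only [List.all_eq_true]; intro p hp
      obtain ⟨k, v⟩ := p
      simpa using PySem.Dict.get?_of_mem_items d hp hd
    simp [h1, h2]
  · obtain ⟨p, hp, hne⟩ : ∃ p ∈ l, d.get? p.1 ≠ some p.2 := by
      simpa using h
    obtain ⟨k, j⟩ := p
    have hm : (l.foldl (fun d p => d.insert p.1 p.2) d).get? k = some j :=
      get?_foldl_insert_of_mem l d k j hl hp
    have hmnd : (l.foldl (fun d p => d.insert p.1 p.2) d).keys.Nodup :=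
      PySem.Dict.nodup_keys_foldl_insert_key l Prod.fst (fun _ p => p.2) d hd
    have hitem : (k, j) ∈ (l.foldl (fun d p => d.insert p.1 p.2) d).items :=
      PySem.Dict.mem_items_of_get?_eq_some _ hm
    have hall : ((l.foldl (fun d p => d.insert p.1 p.2) d).items.all
        (fun p => d.get? p.1 == some p.2)) = false := by
      simp only [List.all_eq_false]
      exact ⟨(k, j), hitem, by simpa using hne⟩
    have hall' : (l.all (fun p => d.get? p.1 == some p.2)) = false := by
      simp only [List.all_eq_false]
      exact ⟨(k, j), hp, by simpa using hne⟩
    simp [hall, hall']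

-- A's loop is the pointwise pair-membership test over the nonzero items
theorem check_eq_filter_all (w : List (String × Int)) (c : List (String × Int))
    (hw : (w.map Prod.fst).Nodup) :
    checkLoop w c = (c.filter (fun p => p.2 ≠ 0)).all (fun p => decide (p ∈ w)) := by
  induction c with
  | nil => simp [checkLoop]
  | cons p rest ih =>
    obtain ⟨i, j⟩ := p
    by_cases hj : j = 0
    · simp [checkLoop, hj, ih]
    · have hmem := mem_iff_pyGetA w i j hw
      cases hget : pyGetA w i with
      | none =>
        have : ¬ (i, j) ∈ w := by rw [hmem, hget]; simp
        simp [checkLoop, hj, hget, List.all_cons, this]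
      | some v =>
        by_cases hv : j = v
        · subst hv
          have : (i, j) ∈ w := hmem.mpr hget
          simp [checkLoop, hj, hget, List.all_cons, this, ih]
        · have : ¬ (i, j) ∈ w := by rw [hmem, hget]; simp [eq_comm, hv]
          simp [checkLoop, hj, hget, hv, List.all_cons, this]

-- ===== VERDICT (by name: the statement is the Claim_ definition above) =====
theorem check_spec : Claim_equal_check := by
  intro w c _ hpre
  unfold Spec_check check check_alt
  simp only
  set F := c.filter (fun p => p.2 ≠ 0) with hF
  set wd := w.foldl (fun d p => d.insert p.1 p.2) (PySem.Dict.empty : PySem.Dict String Int)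
    with hwd
  have hwitems : wd.items = w := wd_items w hpre.1
  have hwnd : wd.keys.Nodup := by
    show (wd.items.map Prod.fst).Nodup
    rw [hwitems]; exact hpre.1
  have hFnd : (F.map Prod.fst).Nodup :=
    (List.Sublist.map Prod.fst List.filter_sublist).nodup hpre.2
  rw [nz_items c hpre.2, ← hF, merge_eq_iff F wd hFnd hwnd,
      check_eq_filter_all w c hpre.1, ← hF]
  have hpt : ∀ p ∈ F, (decide (p ∈ w) : Bool) = (wd.get? p.1 == some p.2) := by
    intro p hp
    obtain ⟨k, j⟩ := p
    have hiff : wd.get? k = some j ↔ (k, j) ∈ w := by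
      conv_rhs => rw [← hwitems]
      exact PySem.Dict.get?_eq_some_iff_mem_items wd k j hwnd
    by_cases hm : (k, j) ∈ w
    · simp [hiff.mpr hm, hm]
    · have hne : wd.get? k ≠ some j := fun hh => hm (hiff.mp hh)
      simp [hne, hm]
  exact all_congr_mem F _ _ hpt
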